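-- pv_equiv track=rewrite | github.com/iancwm/career-lighthouse | api/services/ingestion.py | _split_at_boundaries
-- ===== SOURCE A (Python) =====
-- def _is_table_line(line: str) -> bool:
--     """Return True if the line looks like a pipe-delimited table row."""
--     return line.startswith("|") and "|" in line[1:]
--
-- def _is_list_item(line: str) -> bool:
--     """Return True if the line looks like a markdown list item."""
--     stripped = line.lstrip()
--     return stripped.startswith(("- ", "* "))
--
-- def _split_at_boundaries(text: str) -> list[str]:
--     """Split text into semantic blocks: paragraphs, tables, and lists.
--
--     A paragraph is separated from the next by one or more blank lines.
--     A table is a sequence of consecutive pipe-delimited lines.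
--     A list is a sequence of consecutive list-item lines.
--     """
--     lines = text.split("\n")
--     blocks: list[str] = []
--     current: list[str] = []
--     current_type: str | None = None  # "paragraph", "table", or "list"
--
--     def flush():
--         if current:
--             blocks.append("\n".join(current))
--             current.clear()
--
--     for line in lines:
--         stripped = line.strip()
--         if not stripped:
--             # Blank line — boundary between semantic units
--             flush()
--             current_type = None
--             continue
--
--         if _is_table_line(stripped):
--             if current_type not in ("table",):
--                 flush()
--             current_type = "table"
--             current.append(line)
--         elif _is_list_item(stripped):
--             if current_type not in ("list",):
--                 flush()
--             current_type = "list"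
--             current.append(line)
--         else:
--             if current_type not in ("paragraph",):
--                 flush()
--             current_type = "paragraph"
--             current.append(line)
--
--     flush()
--     return blocks
-- ===== SOURCE B (Python) =====
-- def _is_table_line(line: str) -> bool:
--     return line.startswith("|") and "|" in line[1:]
--
-- def _is_list_item(line: str) -> bool:
--     stripped = line.lstrip()
--     return stripped.startswith(("- ", "* "))
--
-- def _line_kind(line: str):
--     s = line.strip()
--     if not s:
--         return None
--     if _is_table_line(s):
--         return "table"
--     if _is_list_item(s):
--         return "list"
--     return "paragraph"
--
-- def _split_at_boundaries(text: str) -> list[str]: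
--     # Staged: classify every line, compute the boundary (cut) indices where the
--     # classification changes, then slice between consecutive cuts.
--     lines = text.split("\n")
--     kinds = [_line_kind(l) for l in lines]
--     cuts = [i for i in range(len(lines)) if i == 0 or kinds[i] != kinds[i - 1]]
--     cuts.append(len(lines))
--     return [
--         "\n".join(lines[a:b])
--         for a, b in zip(cuts, cuts[1:])
--         if kinds[a] is not None
--     ]
-- ===== Notes on version B (the rewrite author's own statement) =====
-- stated objective: alternative
-- what changed: Replaced A's online state machine (current buffer, current_type, flush) with a staged index computation: classify every line, collect the cut indices where the classification changes, then slice the line list between consecutive cuts and join the non-blank slices.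
import Mathlib
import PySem

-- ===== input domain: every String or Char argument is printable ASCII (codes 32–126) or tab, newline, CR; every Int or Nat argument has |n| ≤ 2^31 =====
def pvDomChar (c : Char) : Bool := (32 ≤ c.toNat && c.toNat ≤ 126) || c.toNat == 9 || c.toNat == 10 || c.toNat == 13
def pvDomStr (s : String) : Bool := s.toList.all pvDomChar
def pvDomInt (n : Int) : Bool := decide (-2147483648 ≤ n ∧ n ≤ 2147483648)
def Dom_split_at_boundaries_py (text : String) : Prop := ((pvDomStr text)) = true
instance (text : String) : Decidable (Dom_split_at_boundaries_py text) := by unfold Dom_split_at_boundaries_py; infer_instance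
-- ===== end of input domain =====

-- B replaces A's online state machine (current / current_type / flush) with a staged
-- computation: classify every line, find the cut indices where the class changes,
-- slice between consecutive cuts (alternative decomposition; same return value).

-- ===== PORT A =====
-- text.split("\n"): the separator is the nonempty literal "\n", so split? never returns none
def pvSplitLines (text : String) : List String :=
  (PySem.Str.split? text "\n").getD []

-- shared helpers: Python's _is_table_line / _is_list_item (identical in Source A and Source B)
def pvIsTableLine (line : String) : Bool :=
  PySem.Str.startswith line "|" && PySem.Str.isIn "|" (PySem.Str.slice line (some 1) none)

def pvIsListItem (line : String) : Bool :=
  let stripped := PySem.Str.lstrip line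
  PySem.Str.startswith stripped "- " || PySem.Str.startswith stripped "* "

-- A's flush(): append "\n".join(current) to blocks if current is nonempty
def pvFlush (blocks cur : List String) : List String :=
  if cur.isEmpty then blocks else blocks ++ [PySem.Str.join "\n" cur]

-- A's for-loop over lines, state = (blocks, current, current_type)
def pvALoop : List String → List String → List String → Option String → List String
  | [], blocks, cur, _ => pvFlush blocks cur
  | line :: rest, blocks, cur, ty =>
    let stripped := PySem.Str.strip line
    if stripped = "" then
      pvALoop rest (pvFlush blocks cur) [] none
    else if pvIsTableLine stripped then
      if ty = some "table" then pvALoop rest blocks (cur ++ [line]) (some "table")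
      else pvALoop rest (pvFlush blocks cur) [line] (some "table")
    else if pvIsListItem stripped then
      if ty = some "list" then pvALoop rest blocks (cur ++ [line]) (some "list")
      else pvALoop rest (pvFlush blocks cur) [line] (some "list")
    else
      if ty = some "paragraph" then pvALoop rest blocks (cur ++ [line]) (some "paragraph")
      else pvALoop rest (pvFlush blocks cur) [line] (some "paragraph")

def split_at_boundaries_py (text : String) : List String :=
  pvALoop (pvSplitLines text) [] [] none

-- ===== PORT B =====
-- Source B's _line_kind
def pvLineKind (line : String) : Option String :=
  let s := PySem.Str.strip line
  if s = "" then none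
  else if pvIsTableLine s then some "table"
  else if pvIsListItem s then some "list"
  else some "paragraph"

-- Source B: kinds = [...]; cuts = [i for i in range(len(lines)) if i == 0 or kinds[i] != kinds[i-1]];
-- cuts.append(len(lines)); ["\n".join(lines[a:b]) for a, b in zip(cuts, cuts[1:]) if kinds[a] is not None]
-- (kinds[a] is always in range, so the pyGet? is matched on: some (some _) emits, some none skips)
def split_at_boundaries_py_alt (text : String) : List String :=
  let lines := pvSplitLines text
  let kinds := lines.map pvLineKind
  let cuts := ((List.range lines.length).filter
      (fun i => i == 0 || kinds[i]? != kinds[i-1]?)) ++ [lines.length]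
  (cuts.zip cuts.tail).filterMap (fun p =>
    match PySem.List.pyGet? kinds (p.1 : Int) with
    | some (some _) =>
        some (PySem.Str.join "\n" (PySem.List.slice lines (some (p.1 : Int)) (some (p.2 : Int))))
    | _ => none)

-- ===== PRECONDITION & SPEC =====
def Spec_split_at_boundaries_py (text : String) (out : List String) : Prop := out = split_at_boundaries_py_alt text
instance (text : String) (out : List String) : Decidable (Spec_split_at_boundaries_py text out) := by unfold Spec_split_at_boundaries_py; infer_instance

-- ===== CLAIM (what is proved, stated in full; the proofs are below) =====
def Claim_equal_split_at_boundaries_py : Prop := ∀ (text : String), Dom_split_at_boundaries_py text → Spec_split_at_boundaries_py text (split_at_boundaries_py text)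

-- ===== LEMMAS AND PROOFS =====

-- proof-side intermediate: the run/groupby view of the blocks
def pvGroupby (ls : List String) : List (Option String × List String) :=
  match ls with
  | [] => []
  | l :: rest =>
    (pvLineKind l, l :: rest.takeWhile (fun x => pvLineKind x == pvLineKind l)) ::
      pvGroupby (rest.dropWhile (fun x => pvLineKind x == pvLineKind l))
termination_by ls.length
decreasing_by
  have := List.length_dropWhile_le (fun x => pvLineKind x == pvLineKind l) rest
  simp; omega

def pvBB (ls : List String) : List String :=
  (pvGroupby ls).filterMap
    (fun g => match g.1 with
      | none => none
      | some _ => some (PySem.Str.join "\n" g.2))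

-- proof-side view of B's pipeline on a list of lines
def pvKC (ks : List (Option String)) : List Nat :=
  (List.range ks.length).filter (fun i => i == 0 || ks[i]? != ks[i-1]?)

def pvC (ls : List String) : List Nat := pvKC (ls.map pvLineKind) ++ [ls.length]

def pvSliceB (ls : List String) : List String :=
  ((pvC ls).zip (pvC ls).tail).filterMap (fun p =>
    match (ls.map pvLineKind)[p.1]? with
    | some (some _) => some (PySem.Str.join "\n" ((ls.drop p.1).take (p.2 - p.1)))
    | _ => none)

lemma pvBB_nil : pvBB [] = [] := by simp [pvBB, pvGroupby]

-- ========== part 1: A's loop equals the run view (loop invariant) ==========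

lemma pvBB_cons_none {l : String} (rest : List String) (h : pvLineKind l = none) :
    pvBB (l :: rest) = pvBB (rest.dropWhile (fun x => pvLineKind x == none)) := by
  rw [pvBB, pvGroupby]
  simp [h, pvBB]

lemma pvBB_dropNone (ls : List String) :
    pvBB (ls.dropWhile (fun x => pvLineKind x == none)) = pvBB ls := by
  cases ls with
  | nil => rfl
  | cons r rs =>
    by_cases h : pvLineKind r = none
    · rw [List.dropWhile_cons_of_pos (by simp [h]), pvBB_cons_none rs h]
    · rw [List.dropWhile_cons_of_neg (by simp [h])]

lemma pvBB_skip {l : String} (rest : List String) (h : pvLineKind l = none) :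
    pvBB (l :: rest) = pvBB rest := by
  rw [pvBB_cons_none rest h, pvBB_dropNone]

lemma pv_takeDrop (ls : List String) (t : String)
    (h3 : ∀ l, ls.head? = some l → pvLineKind l ≠ some t) :
    ∀ cs : List String, (∀ x ∈ cs, pvLineKind x = some t) →
    (cs ++ ls).takeWhile (fun x => pvLineKind x == some t) = cs ∧
    (cs ++ ls).dropWhile (fun x => pvLineKind x == some t) = ls := by
  intro cs
  induction cs with
  | nil =>
    intro _
    simp only [List.nil_append]
    cases ls with
    | nil => simp
    | cons l ls' =>
      have := h3 l (by simp)
      constructor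
      · rw [List.takeWhile_cons_of_neg (by simpa using this)]
      · rw [List.dropWhile_cons_of_neg (by simpa using this)]
  | cons c cs' ih =>
    intro h2
    have hc : pvLineKind c = some t := h2 c (by simp)
    have ih' := ih (fun x hx => h2 x (by simp [hx]))
    constructor
    · rw [List.cons_append, List.takeWhile_cons_of_pos (by simp [hc]), ih'.1]
    · rw [List.cons_append, List.dropWhile_cons_of_pos (by simp [hc]), ih'.2]

lemma pvBB_split (c : String) (cs ls : List String) (t : String)
    (h2 : ∀ x ∈ c :: cs, pvLineKind x = some t)
    (h3 : ∀ l, ls.head? = some l → pvLineKind l ≠ some t) :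
    pvBB ((c :: cs) ++ ls) = PySem.Str.join "\n" (c :: cs) :: pvBB ls := by
  have hc : pvLineKind c = some t := h2 c (by simp)
  have htd := pv_takeDrop ls t h3 cs (fun x hx => h2 x (by simp [hx]))
  rw [List.cons_append, pvBB, pvGroupby]
  simp only [hc]
  rw [htd.1, htd.2]
  simp [pvBB]

-- the loop invariant: current is empty with type None, or nonempty with all its
-- lines of the (some) current type
lemma pv_main (ls : List String) : ∀ (blocks cur : List String) (ty : Option String),
    ((cur = [] ∧ ty = none) ∨
      (∃ t, ty = some t ∧ cur ≠ [] ∧ ∀ x ∈ cur, pvLineKind x = some t)) →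
    pvALoop ls blocks cur ty = blocks ++ pvBB (cur ++ ls) := by
  induction ls with
  | nil =>
    intro blocks cur ty hinv
    rcases hinv with ⟨hc, _⟩ | ⟨t, _, hne, hall⟩
    · subst hc; simp [pvALoop, pvFlush, pvBB_nil]
    · obtain ⟨c, cs, rfl⟩ := List.exists_cons_of_ne_nil hne
      rw [pvALoop, pvBB_split c cs [] t hall (by intro l hl; simp at hl), pvBB_nil]
      simp [pvFlush]
  | cons l rest ih =>
    intro blocks cur ty hinv
    rw [pvALoop]
    by_cases hs : PySem.Str.strip l = ""
    · have hk : pvLineKind l = none := by simp [pvLineKind, hs]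
      simp only [hs, if_true]
      rw [ih (pvFlush blocks cur) [] none (Or.inl ⟨rfl, rfl⟩), List.nil_append]
      rcases hinv with ⟨hc, _⟩ | ⟨t, _, hne, hall⟩
      · subst hc
        simp [pvFlush, pvBB_skip rest hk]
      · obtain ⟨c, cs, rfl⟩ := List.exists_cons_of_ne_nil hne
        rw [pvBB_split c cs (l :: rest) t hall
            (by intro x hx; simp at hx; subst hx; simp [hk]),
          pvBB_skip rest hk]
        simp [pvFlush]
    · -- classified line; the three typed branches are identical up to the kind string
      have hstep : ∀ (k : String), pvLineKind l = some k →
          (if ty = some k then pvALoop rest blocks (cur ++ [l]) (some k)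
           else pvALoop rest (pvFlush blocks cur) [l] (some k)) =
          blocks ++ pvBB (cur ++ l :: rest) := by
        intro k hk
        by_cases hty : ty = some k
        · subst hty
          rcases hinv with ⟨_, habs⟩ | ⟨t, hts, hne, hall⟩
          · exact absurd habs (by simp)
          · have ht : t = k := by simpa using hts.symm
            subst ht
            rw [if_pos rfl,
              ih blocks (cur ++ [l]) (some t)
                (Or.inr ⟨t, rfl, by simp, by
                  intro x hx
                  rcases List.mem_append.1 hx with h | h
                  · exact hall x h
                  · simp at h; subst h; exact hk⟩)]
            simp
        · rw [if_neg hty,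
            ih (pvFlush blocks cur) [l] (some k)
              (Or.inr ⟨k, rfl, by simp, by intro x hx; simp at hx; subst hx; exact hk⟩)]
          rcases hinv with ⟨hc, _⟩ | ⟨t, hts, hne, hall⟩
          · subst hc; simp [pvFlush]
          · obtain ⟨c, cs, rfl⟩ := List.exists_cons_of_ne_nil hne
            rw [pvBB_split c cs (l :: rest) t hall
              (by intro x hx; simp at hx; subst hx; rw [hk]
                  intro h; apply hty; rw [hts]; simpa using h.symm)]
            simp [pvFlush]
      by_cases h1 : pvIsTableLine (PySem.Str.strip l)
      · simp only [hs, h1, if_false]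
        exact hstep "table" (by simp [pvLineKind, hs, h1])
      · by_cases h2 : pvIsListItem (PySem.Str.strip l)
        · simp only [hs, h1, h2, if_false, if_true]
          exact hstep "list" (by simp [pvLineKind, hs, h1, h2])
        · simp only [hs, h1, h2, if_false]
          exact hstep "paragraph" (by simp [pvLineKind, hs, h1, h2])

-- ========== part 2: the run view equals B's cut-index view ==========

lemma pv_head_dropWhile {α : Type} (p : α → Bool) (l : List α) :
    ∀ y, (l.dropWhile p).head? = some y → p y = false := by
  induction l with
  | nil => intro y h; simp at h
  | cons a as ih =>
    intro y h
    by_cases hp : p a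
    · rw [List.dropWhile_cons_of_pos hp] at h; exact ih y h
    · rw [List.dropWhile_cons_of_neg hp] at h
      simp at h; subst h; simpa using hp

-- cut indices of a concatenation whose first part is one constant run
lemma pvKC_split (k0 : Option String) (kr kd : List (Option String))
    (hne : kr ≠ []) (hall : ∀ x ∈ kr, x = k0)
    (hhd : ∀ y, kd.head? = some y → y ≠ k0) :
    pvKC (kr ++ kd) = 0 :: (pvKC kd).map (kr.length + ·) := by
  have hgetl : ∀ i, i < kr.length → (kr ++ kd)[i]? = some k0 := by
    intro i hi
    rw [List.getElem?_append_left hi, List.getElem?_eq_getElem hi]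
    exact congrArg some (hall _ (List.getElem_mem hi))
  have hgetr : ∀ j : Nat, (kr ++ kd)[kr.length + j]? = kd[j]? := by
    intro j
    rw [List.getElem?_append_right (by omega)]
    congr 1; omega
  have h1 : (List.range kr.length).filter
      (fun i => i == 0 || (kr ++ kd)[i]? != (kr ++ kd)[i-1]?) = [0] := by
    obtain ⟨rr, hr⟩ : ∃ rr, kr.length = rr + 1 := by
      cases kr with
      | nil => exact absurd rfl hne
      | cons a as => exact ⟨as.length, by simp⟩
    rw [List.filter_congr (q := fun i => i == 0)
        (by
          intro i hi
          have hi' : i < kr.length := by simpa using hi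
          by_cases h0 : i = 0
          · subst h0; rfl
          · have hlt : i - 1 < kr.length := by omega
            rw [hgetl i hi', hgetl (i-1) hlt]
            simp)]
    rw [hr, List.range_succ_eq_map, List.filter_cons_of_pos (by simp), List.filter_map]
    simp [Function.comp_def]
  have h2 : (List.map (kr.length + ·) (List.range kd.length)).filter
      (fun i => i == 0 || (kr ++ kd)[i]? != (kr ++ kd)[i-1]?) =
      ((List.range kd.length).filter
        (fun i => i == 0 || kd[i]? != kd[i-1]?)).map (kr.length + ·) := by
    rw [List.filter_map]
    congr 1
    apply List.filter_congr
    intro j hj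
    have hj' : j < kd.length := by simpa using hj
    simp only [Function.comp]
    by_cases h0 : j = 0
    · subst h0
      obtain ⟨y, hy⟩ : ∃ y, kd[0]? = some y :=
        ⟨kd[0]'hj', List.getElem?_eq_getElem hj'⟩
      have hyk : y ≠ k0 := hhd y (by rw [List.head?_eq_getElem?]; exact hy)
      have hr1 : kr.length - 1 < kr.length := by
        cases kr with
        | nil => exact absurd rfl hne
        | cons a as => simp
      have hne0 : kr.length ≠ 0 := by
        cases kr with
        | nil => exact absurd rfl hne
        | cons a as => simp
      simp only [Nat.add_zero]
      rw [show (kr ++ kd)[kr.length]? = kd[0]? by simpa using hgetr 0, hy,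
        hgetl (kr.length - 1) hr1]
      simp [hne0, hyk, bne_iff_ne]
    · have heq : kr.length + j - 1 = kr.length + (j - 1) := by omega
      rw [hgetr j, heq, hgetr (j - 1)]
      have e1 : (kr.length + j == 0) = false := beq_eq_false_iff_ne.mpr (by omega)
      have e2 : (j == 0) = false := beq_eq_false_iff_ne.mpr h0
      rw [e1, e2]
  unfold pvKC
  rw [show (kr ++ kd).length = kr.length + kd.length by simp, List.range_add,
    List.filter_append, h1, h2]
  rfl

-- the cut list always starts with 0
lemma pvC_head (ls : List String) : ∃ t, pvC ls = 0 :: t := by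
  cases ls with
  | nil => exact ⟨[], by simp [pvC, pvKC]⟩
  | cons l rest =>
    unfold pvC pvKC
    rw [show (((l :: rest).map pvLineKind)).length = rest.length + 1 by simp,
      List.range_succ_eq_map, List.filter_cons_of_pos (by simp), List.cons_append]
    exact ⟨_, rfl⟩

-- B's cut-index view of a concatenation whose first part is one constant run
lemma pvSliceB_split (run d : List String) (k0 : Option String)
    (hne : run ≠ []) (hall : ∀ x ∈ run, pvLineKind x = k0)
    (hhd : ∀ y, d.head? = some y → pvLineKind y ≠ k0) :
    pvSliceB (run ++ d) =
      if k0.isSome then PySem.Str.join "\n" run :: pvSliceB d else pvSliceB d := by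
  have hmap : (run ++ d).map pvLineKind = run.map pvLineKind ++ d.map pvLineKind :=
    List.map_append ..
  have hkey := pvKC_split k0 (run.map pvLineKind) (d.map pvLineKind)
      (by simpa using hne)
      (by intro x hx; obtain ⟨a, ha, rfl⟩ := List.mem_map.1 hx; exact hall a ha)
      (by
        intro y hy
        rw [List.head?_map] at hy
        cases hd : d.head? with
        | none => rw [hd] at hy; simp at hy
        | some z =>
          rw [hd] at hy; simp at hy
          subst hy; exact hhd z hd)
  have hC : pvC (run ++ d) = 0 :: (pvC d).map (run.length + ·) := by
    unfold pvC
    rw [hmap, hkey]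
    simp
  have hget0 : ((run ++ d).map pvLineKind)[0]? = some k0 := by
    obtain ⟨a, as, rfl⟩ := List.exists_cons_of_ne_nil hne
    simp [hall a (by simp)]
  have hgetr : ∀ j : Nat, ((run ++ d).map pvLineKind)[run.length + j]? =
      (d.map pvLineKind)[j]? := by
    intro j
    rw [hmap, List.getElem?_append_right (by simp), List.length_map]
    congr 1; omega
  have hdropr : ∀ j : Nat, (run ++ d).drop (run.length + j) = d.drop j := by
    intro j
    simp [List.drop_append]
  obtain ⟨t, ht⟩ := pvC_head d
  have hzip : ((0 :: (pvC d).map (run.length + ·)).zip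
        (0 :: (pvC d).map (run.length + ·)).tail) =
      (0, run.length) ::
        ((pvC d).zip (pvC d).tail).map
          (Prod.map (run.length + ·) (run.length + ·)) := by
    rw [ht]
    simp only [List.map_cons, List.tail_cons, List.zip_cons_cons, Nat.add_zero]
    congr 1
    rw [show (run.length :: (t.map (run.length + ·))) =
        ((0 :: t).map (run.length + ·)) by simp, ← List.zip_map]
  unfold pvSliceB
  rw [hC, hzip, List.filterMap_cons, List.filterMap_map]
  have hfun : ((fun p : Nat × Nat =>
        match ((run ++ d).map pvLineKind)[p.1]? with
        | some (some _) =>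
            some (PySem.Str.join "\n" (((run ++ d).drop p.1).take (p.2 - p.1)))
        | _ => none) ∘ Prod.map (run.length + ·) (run.length + ·)) =
      (fun p : Nat × Nat =>
        match (d.map pvLineKind)[p.1]? with
        | some (some _) => some (PySem.Str.join "\n" ((d.drop p.1).take (p.2 - p.1)))
        | _ => none) := by
    funext p
    simp only [Function.comp, Prod.map]
    rw [hgetr p.1, hdropr p.1, show run.length + p.2 - (run.length + p.1) = p.2 - p.1 by omega]
  rw [hfun]
  have htake : ((run ++ d).drop 0).take (run.length - 0) = run := by
    rw [List.drop_zero, Nat.sub_zero, List.take_left]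
  simp only [hget0, htake]
  cases k0 <;> rfl

-- pvBB = pvSliceB, by recursion on the run decomposition
lemma pvBB_eq_pvSliceB : ∀ ls : List String, pvBB ls = pvSliceB ls
  | [] => by simp [pvBB, pvGroupby, pvSliceB]
  | l :: rest => by
    have ih := pvBB_eq_pvSliceB
      (rest.dropWhile (fun x => pvLineKind x == pvLineKind l))
    have hall : ∀ x ∈ l :: rest.takeWhile (fun x => pvLineKind x == pvLineKind l),
        pvLineKind x = pvLineKind l := by
      intro x hx
      simp only [List.mem_cons] at hx
      rcases hx with rfl | hx
      · rfl
      · simpa using List.mem_takeWhile_imp hx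
    have hhd : ∀ y, (rest.dropWhile (fun x => pvLineKind x == pvLineKind l)).head? =
        some y → pvLineKind y ≠ pvLineKind l := by
      intro y hy
      have := pv_head_dropWhile _ rest y hy
      simpa using this
    have hsplit : l :: rest =
        (l :: rest.takeWhile (fun x => pvLineKind x == pvLineKind l)) ++
          rest.dropWhile (fun x => pvLineKind x == pvLineKind l) := by
      simp [List.takeWhile_append_dropWhile]
    have hL : pvBB (l :: rest) =
        match pvLineKind l with
        | none => pvBB (rest.dropWhile (fun x => pvLineKind x == pvLineKind l))
        | some _ =>
            PySem.Str.join "\n"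
                (l :: rest.takeWhile (fun x => pvLineKind x == pvLineKind l)) ::
              pvBB (rest.dropWhile (fun x => pvLineKind x == pvLineKind l)) := by
      rw [pvBB, pvGroupby]
      cases pvLineKind l <;> simp [pvBB]
    rw [hL, ih]
    conv_rhs => rw [hsplit]
    rw [pvSliceB_split _ _ (pvLineKind l) (by simp) hall hhd]
    cases pvLineKind l <;> rfl
termination_by ls => ls.length
decreasing_by
  have := List.length_dropWhile_le (fun x => pvLineKind x == pvLineKind l) rest
  simp; omega

-- the B port equals its proof-side view
lemma pvAlt_eq (text : String) :
    split_at_boundaries_py_alt text = pvSliceB (pvSplitLines text) := by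
  simp only [split_at_boundaries_py_alt, pvSliceB, pvC, pvKC, List.length_map]
  congr 1
  funext p
  simp only [PySem.List.pyGet?_natCast, List.getElem?_map, PySem.List.slice_natCast]

-- ===== VERDICT (by name: the statement is the Claim_ definition above) =====
theorem split_at_boundaries_py_spec : Claim_equal_split_at_boundaries_py := by
  intro text _
  unfold Spec_split_at_boundaries_py split_at_boundaries_py
  rw [pv_main (pvSplitLines text) [] [] none (Or.inl ⟨rfl, rfl⟩), pvAlt_eq,
    ← pvBB_eq_pvSliceB]
  simp
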